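-- pv_equiv track=rewrite | github.com/dongsub-joung/zero-base | 0804/N4.py | solution
-- ===== SOURCE A (Python) =====
-- def solution(arr: list)->int:
--     answer= []
--     cnt= 0
--     for i in range(len(arr)):
--         for j in range(1, len(arr)-1):
--             if arr[i] == 1 and arr[j] == 1:
--                 cnt+= (arr[i] + arr[j])
--     return cnt
-- ===== SOURCE B (Python) =====
-- def solution(arr: list) -> int:
--     # Closed form: A adds arr[i]+arr[j] (=2) for every i in range(len(arr))
--     # and j in range(1, len(arr)-1) with arr[i]==arr[j]==1.
--     return 2 * arr.count(1) * arr[1:-1].count(1)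
-- ===== Notes on version B (the rewrite author's own statement) =====
-- stated objective: faster
-- what changed: Replaced the nested index loops by a closed form: 2 * count of 1s in the whole list * count of 1s in arr[1:-1].
import Mathlib
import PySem

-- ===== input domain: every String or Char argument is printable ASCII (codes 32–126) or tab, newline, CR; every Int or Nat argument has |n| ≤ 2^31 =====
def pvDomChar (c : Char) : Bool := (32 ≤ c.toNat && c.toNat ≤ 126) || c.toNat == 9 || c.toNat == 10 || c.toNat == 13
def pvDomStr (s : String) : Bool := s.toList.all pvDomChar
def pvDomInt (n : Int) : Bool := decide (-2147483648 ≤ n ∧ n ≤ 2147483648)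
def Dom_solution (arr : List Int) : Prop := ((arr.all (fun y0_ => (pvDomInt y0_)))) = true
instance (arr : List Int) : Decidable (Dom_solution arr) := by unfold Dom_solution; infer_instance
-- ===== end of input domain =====

-- ===== PORT A =====
-- B replaces A's nested quadratic index loops by a closed-form product of two linear counts (objective: faster).
def solution (arr : List Int) : Int :=
  (PySem.List.pyRange 0 (arr.length : Int) 1).foldl (fun cnt i =>
    (PySem.List.pyRange 1 ((arr.length : Int) - 1) 1).foldl (fun cnt j =>
      if PySem.List.pyGetD arr i 0 = 1 ∧ PySem.List.pyGetD arr j 0 = 1 then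
        cnt + (PySem.List.pyGetD arr i 0 + PySem.List.pyGetD arr j 0)
      else cnt) cnt) 0

-- ===== PORT B =====
def solution_alt (arr : List Int) : Int :=
  2 * (PySem.List.count arr 1 : Int)
    * (PySem.List.count (PySem.List.slice arr (some 1) (some (-1))) 1 : Int)

-- ===== PRECONDITION & SPEC =====
def Spec_solution (arr : List Int) (out : Int) : Prop := out = solution_alt arr
instance (arr : List Int) (out : Int) : Decidable (Spec_solution arr out) := by unfold Spec_solution; infer_instance

-- ===== CLAIM (what is proved, stated in full; the proofs are below) =====
def Claim_equal_solution : Prop := ∀ (arr : List Int), Dom_solution arr → Spec_solution arr (solution arr)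

-- ===== LEMMAS AND PROOFS =====

-- the values A's inner loop reads, arr[j] for j in range(1, len(arr)-1), are exactly B's slice arr[1:-1]
lemma pv_mid_eq (arr : List Int) :
    (PySem.List.pyRange 1 ((arr.length : Int) - 1) 1).map
      (fun j => PySem.List.pyGetD arr j 0)
      = PySem.List.slice arr (some 1) (some (-1)) := by
  apply List.ext_getElem
  · by_cases h : arr = [] <;>
      simp [h, PySem.List.length_pyRange_one, PySem.List.slice, PySem.List.clampIdx] <;>
      omega
  · intro k h1 h2
    have hk : (1 : Int) + k < arr.length := by
      simp [PySem.List.length_pyRange_one] at h1; omega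
    simp only [List.getElem_map, PySem.List.getElem_pyRange_one]
    rw [PySem.List.pyGetD_eq_getElem arr 0 (by omega) hk]
    simp [PySem.List.slice, PySem.List.clampIdx, List.getElem_take, List.getElem_drop]
    congr 1
    omega

-- A's inner loop with arr[i] = v ≠ 1: no condition ever fires, cnt is unchanged
lemma pv_inner_zero (arr : List Int) (l : List Int) {v : Int} (hv : v ≠ 1) (cnt : Int) :
    l.foldl (fun c j =>
      if v = 1 ∧ PySem.List.pyGetD arr j 0 = 1 then
        c + (v + PySem.List.pyGetD arr j 0) else c) cnt = cnt := by
  induction l generalizing cnt with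
  | nil => rfl
  | cons j t ih => simpa [hv] using ih cnt

-- A's inner loop with arr[i] = 1: cnt grows by 2 per index j with arr[j] = 1
lemma pv_inner_one (arr : List Int) (l : List Int) (cnt : Int) :
    l.foldl (fun c j =>
      if (1 : Int) = 1 ∧ PySem.List.pyGetD arr j 0 = 1 then
        c + (1 + PySem.List.pyGetD arr j 0) else c) cnt
    = cnt + 2 * ((l.map (fun j => PySem.List.pyGetD arr j 0)).count 1 : Int) := by
  induction l generalizing cnt with
  | nil => simp
  | cons j t ih =>
    by_cases hj : PySem.List.pyGetD arr j 0 = 1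
    · rw [List.foldl_cons, if_pos ⟨rfl, hj⟩, hj, ih, List.map_cons, hj,
        List.count_cons_self]
      push_cast; ring
    · rw [List.foldl_cons, if_neg (by simp [hj]), ih, List.map_cons,
        List.count_cons_of_ne hj]

-- A's outer loop: adding (2*m per element equal to 1) over arr
lemma pv_outer_fold (arr : List Int) (m cnt : Int) :
    arr.foldl (fun c v => c + (if v = 1 then 2 * m else 0)) cnt
    = cnt + 2 * m * (arr.count 1 : Int) := by
  induction arr generalizing cnt with
  | nil => simp
  | cons x t ih =>
    rw [List.foldl_cons, ih]
    by_cases hx : x = 1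
    · rw [hx, List.count_cons_self]; push_cast; ring
    · rw [if_neg hx, List.count_cons_of_ne hx]; ring

lemma pv_main (arr : List Int) : solution arr = solution_alt arr := by
  have h1 : solution arr = arr.foldl (fun c v =>
      (PySem.List.pyRange 1 ((arr.length : Int) - 1) 1).foldl (fun c j =>
        if v = 1 ∧ PySem.List.pyGetD arr j 0 = 1 then
          c + (v + PySem.List.pyGetD arr j 0) else c) c) 0 := by
    unfold solution
    exact PySem.List.foldl_pyRange_zero_pyGetD' arr 0 (fun c v =>
      (PySem.List.pyRange 1 ((arr.length : Int) - 1) 1).foldl (fun c j =>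
        if v = 1 ∧ PySem.List.pyGetD arr j 0 = 1 then
          c + (v + PySem.List.pyGetD arr j 0) else c) c) 0
  rw [h1, PySem.List.foldl_congr_mem _ _
    (fun c v => c + (if v = 1 then
      2 * ((PySem.List.slice arr (some 1) (some (-1))).count 1 : Int) else 0)) 0 ?_,
    pv_outer_fold]
  · unfold solution_alt
    rw [PySem.List.count_eq, PySem.List.count_eq]
    ring
  · intro c v _
    by_cases hv : v = 1
    · subst hv
      rw [pv_inner_one, pv_mid_eq]; simp
    · rw [pv_inner_zero arr _ hv]; simp [hv]

-- ===== VERDICT (by name: the statement is the Claim_ definition above) =====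
theorem solution_spec : Claim_equal_solution := by
  intro arr _
  unfold Spec_solution
  exact pv_main arr
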